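-- pv_equiv track=rewrite | github.com/Minki-Trader/Project_Obsidian_Prime_v2 | stage_pipelines/stage13/mlp_feature_group_interaction_docs.py | replace_or_insert_block
-- ===== SOURCE A (Python) =====
-- def replace_or_insert_block(text: str, key: str, block: str) -> str:
--     lines = text.splitlines()
--     start = next((index for index, line in enumerate(lines) if line == f"{key}:"), None)
--     if start is None:
--         insert = next((index for index, line in enumerate(lines) if line == "stage01_raw_m5_inventory:"), len(lines))
--         return "\n".join(lines[:insert] + block.rstrip().splitlines() + lines[insert:])
--     end = start + 1
--     while end < len(lines) and (lines[end].startswith("  ") or not lines[end].strip()):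
--         end += 1
--     return "\n".join(lines[:start] + block.rstrip().splitlines() + lines[end:])
-- ===== SOURCE B (Python) =====
-- def replace_or_insert_block(text: str, key: str, block: str) -> str:
--     lines = text.splitlines()
--     blk = block.rstrip().splitlines()
--     out = []
--     if (key + ":") in lines:
--         state = 0  # 0 = copying before key, 1 = skipping old block, 2 = copying tail
--         for line in lines:
--             if state == 0:
--                 if line == key + ":":
--                     out.extend(blk)
--                     state = 1
--                 else:
--                     out.append(line)
--             elif state == 1:
--                 if line.startswith("  ") or not line.strip():
--                     pass
--                 else:
--                     state = 2
--                     out.append(line)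
--             else:
--                 out.append(line)
--     else:
--         inserted = False
--         for line in lines:
--             if not inserted and line == "stage01_raw_m5_inventory:":
--                 out.extend(blk)
--                 inserted = True
--             out.append(line)
--         if not inserted:
--             out.extend(blk)
--     return "\n".join(out)
-- ===== Notes on version B (the rewrite author's own statement) =====
-- stated objective: alternative
-- what changed: Replaces A's two index searches plus list slicing with a single forward copying pass over the lines carrying a small state (copy / skip-old-block / copy-tail, or a not-yet-inserted flag), after one membership test for the key line.
import Mathlib
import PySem

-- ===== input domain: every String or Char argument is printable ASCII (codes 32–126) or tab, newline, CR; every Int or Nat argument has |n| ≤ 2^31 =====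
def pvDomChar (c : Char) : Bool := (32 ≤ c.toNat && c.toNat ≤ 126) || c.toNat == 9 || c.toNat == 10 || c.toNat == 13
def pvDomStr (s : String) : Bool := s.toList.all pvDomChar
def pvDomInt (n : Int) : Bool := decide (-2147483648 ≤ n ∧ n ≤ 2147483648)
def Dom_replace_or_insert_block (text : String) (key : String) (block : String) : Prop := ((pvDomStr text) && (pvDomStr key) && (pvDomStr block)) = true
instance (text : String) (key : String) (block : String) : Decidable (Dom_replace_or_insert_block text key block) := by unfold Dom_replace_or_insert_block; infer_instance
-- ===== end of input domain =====

-- B replaces A's index-hunting-and-slicing with one forward copying pass carrying a small state; same cost, different decomposition (objective: alternative).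

-- ===== PORT A =====
-- the while loop of A: advances `end` while the current line starts a block continuation
def pvEndFrom : List String → Nat → Nat
  | [], e => e
  | l :: rest, e =>
    if PySem.Str.startswith l "  " || (PySem.Str.strip l == "") then pvEndFrom rest (e + 1) else e

def replace_or_insert_block (text : String) (key : String) (block : String) : String :=
  let lines := PySem.Str.splitlines text
  match lines.findIdx? (fun l => l == key ++ ":") with
  | none =>
    let ins := (lines.findIdx? (fun l => l == "stage01_raw_m5_inventory:")).getD lines.length
    PySem.Str.join "\n" (lines.take ins ++ PySem.Str.splitlines (PySem.Str.rstrip block) ++ lines.drop ins)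
  | some start =>
    let e := pvEndFrom (lines.drop (start + 1)) (start + 1)
    PySem.Str.join "\n" (lines.take start ++ PySem.Str.splitlines (PySem.Str.rstrip block) ++ lines.drop e)

-- ===== PORT B =====
-- state 0 = copying before the key line, 1 = skipping the old block, 2 = copying the tail
def pvBReplace (keyline : String) (blk : List String) : List String → Nat → List String
  | [], _ => []
  | l :: ls, state =>
    if state == 0 then
      if l == keyline then blk ++ pvBReplace keyline blk ls 1
      else l :: pvBReplace keyline blk ls 0
    else if state == 1 then
      if PySem.Str.startswith l "  " || (PySem.Str.strip l == "") then pvBReplace keyline blk ls 1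
      else l :: pvBReplace keyline blk ls 2
    else l :: pvBReplace keyline blk ls 2

def pvBInsert (blk : List String) : List String → Bool → List String
  | [], inserted => if inserted then [] else blk
  | l :: ls, inserted =>
    if !inserted && (l == "stage01_raw_m5_inventory:") then blk ++ l :: pvBInsert blk ls true
    else l :: pvBInsert blk ls inserted

def replace_or_insert_block_alt (text : String) (key : String) (block : String) : String :=
  let lines := PySem.Str.splitlines text
  let blk := PySem.Str.splitlines (PySem.Str.rstrip block)
  if lines.contains (key ++ ":") then
    PySem.Str.join "\n" (pvBReplace (key ++ ":") blk lines 0)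
  else
    PySem.Str.join "\n" (pvBInsert blk lines false)

-- ===== PRECONDITION & SPEC =====
def Spec_replace_or_insert_block (text : String) (key : String) (block : String) (out : String) : Prop := out = replace_or_insert_block_alt text key block
instance (text : String) (key : String) (block : String) (out : String) : Decidable (Spec_replace_or_insert_block text key block out) := by unfold Spec_replace_or_insert_block; infer_instance

-- ===== CLAIM (what is proved, stated in full; the proofs are below) =====
def Claim_equal_replace_or_insert_block : Prop := ∀ (text : String) (key : String) (block : String), Dom_replace_or_insert_block text key block → Spec_replace_or_insert_block text key block (replace_or_insert_block text key block)

-- ===== LEMMAS AND PROOFS =====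

theorem pvEndFrom_succ (xs : List String) (e : Nat) : pvEndFrom xs (e + 1) = pvEndFrom xs e + 1 := by
  induction xs generalizing e with
  | nil => rfl
  | cons l ls ih =>
    simp only [pvEndFrom]
    split <;> simp [ih]

theorem pvEndFrom_drop (xs : List String) :
    xs.drop (pvEndFrom xs 0) = xs.dropWhile (fun l => PySem.Str.startswith l "  " || (PySem.Str.strip l == "")) := by
  induction xs with
  | nil => rfl
  | cons l ls ih =>
    simp only [pvEndFrom, List.dropWhile_cons]
    split
    · rw [pvEndFrom_succ, List.drop_succ_cons, ih]
    · rfl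

theorem pvBReplace_two (k : String) (blk : List String) (xs : List String) :
    pvBReplace k blk xs 2 = xs := by
  induction xs with
  | nil => rfl
  | cons l ls ih => simp [pvBReplace, ih]

theorem pvBReplace_one (k : String) (blk : List String) (xs : List String) :
    pvBReplace k blk xs 1 = xs.dropWhile (fun l => PySem.Str.startswith l "  " || (PySem.Str.strip l == "")) := by
  induction xs with
  | nil => rfl
  | cons l ls ih =>
    simp only [pvBReplace, List.dropWhile_cons]
    split <;> simp_all [pvBReplace_two]

theorem pvBReplace_zero (k : String) (blk : List String) (xs : List String) (s : Nat)
    (h : xs.findIdx? (fun l => l == k) = some s) :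
    xs.take s ++ blk ++ xs.drop (pvEndFrom (xs.drop (s + 1)) (s + 1)) = pvBReplace k blk xs 0 := by
  induction xs generalizing s with
  | nil => simp at h
  | cons l ls ih =>
    rw [List.findIdx?_cons] at h
    by_cases hl : (l == k) = true
    · rw [if_pos hl] at h
      injection h with h
      subst h
      simp only [List.take_zero, List.drop_succ_cons, List.drop_zero, pvEndFrom_succ,
        List.drop_succ_cons, pvBReplace, hl]
      simp [pvEndFrom_drop, pvBReplace_one]
    · rw [if_neg hl] at h
      obtain ⟨s', hs', hmap⟩ := Option.map_eq_some_iff.mp h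
      subst hmap
      have := ih s' hs'
      simp only [pvBReplace, hl]
      rw [List.take_succ_cons]
      have hshift : pvEndFrom ((l :: ls).drop (s' + 1 + 1)) (s' + 1 + 1)
          = pvEndFrom (ls.drop (s' + 1)) (s' + 1) + 1 := by
        rw [List.drop_succ_cons, pvEndFrom_succ]
      rw [hshift, List.drop_succ_cons]
      simp only [List.cons_append, List.append_assoc] at this ⊢
      rw [this]
      simp

theorem pvBInsert_true (blk : List String) (xs : List String) : pvBInsert blk xs true = xs := by
  induction xs with
  | nil => rfl
  | cons l ls ih => simp [pvBInsert, ih]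

theorem pvBInsert_false (blk : List String) (xs : List String) :
    pvBInsert blk xs false =
      xs.take ((xs.findIdx? (fun l => l == "stage01_raw_m5_inventory:")).getD xs.length) ++ blk ++
      xs.drop ((xs.findIdx? (fun l => l == "stage01_raw_m5_inventory:")).getD xs.length) := by
  induction xs with
  | nil => simp [pvBInsert]
  | cons l ls ih =>
    rw [List.findIdx?_cons]
    by_cases hl : (l == "stage01_raw_m5_inventory:") = true
    · simp [pvBInsert, hl, pvBInsert_true]
    · simp only [hl]
      simp only [pvBInsert, hl, Bool.not_false, Bool.true_and]
      cases hfi : ls.findIdx? (fun l => l == "stage01_raw_m5_inventory:") with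
      | none =>
        simp only [hfi, Option.map_none, Option.getD_none] at ih ⊢
        simp [ih, List.length_cons]
      | some s =>
        simp only [hfi, Option.map_some, Option.getD_some] at ih ⊢
        simp [ih]

theorem contains_eq_isSome_findIdx? (xs : List String) (k : String) :
    xs.contains k = (xs.findIdx? (fun l => l == k)).isSome := by
  induction xs with
  | nil => rfl
  | cons l ls ih =>
    rw [List.contains_cons, List.findIdx?_cons]
    by_cases hl : l = k
    · subst hl; simp
    · have h1 : (l == k) = false := by simp [hl]
      have h2 : (k == l) = false := by simp [Ne.symm hl]
      simpa [h1, h2] using ih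

-- ===== VERDICT (by name: the statement is the Claim_ definition above) =====
theorem replace_or_insert_block_spec : Claim_equal_replace_or_insert_block := by
  intro text key block _
  unfold Spec_replace_or_insert_block replace_or_insert_block replace_or_insert_block_alt
  cases hfi : (PySem.Str.splitlines text).findIdx? (fun l => l == key ++ ":") with
  | none =>
    have hc : (PySem.Str.splitlines text).contains (key ++ ":") = false := by
      rw [contains_eq_isSome_findIdx?, hfi]; rfl
    simp only [hfi]
    rw [hc, if_neg (by simp), pvBInsert_false]
  | some s =>
    have hc : (PySem.Str.splitlines text).contains (key ++ ":") = true := by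
      rw [contains_eq_isSome_findIdx?, hfi]; rfl
    simp only [hfi]
    rw [hc, if_pos rfl, ← pvBReplace_zero (key ++ ":") _ _ s hfi]
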